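-- pv_equiv track=rewrite | github.com/raychorn/2nd-Max-Test | main.py | first_and_second_max
-- ===== SOURCE A (Python) =====
-- def first_and_second_max(items):
--   items = list(set(items))  # the list must not have dupes for any of this to work
--   def get_a_max(alist):
--     maximum = -99999999999999999
--     for v in items:
--       maximum = max(v, maximum)
--     return maximum
--
--
--   first_max = get_a_max(items)
--   items = set(items) - set([first_max]) # remove all instances of first_max and reconsider
--   second_max = get_a_max(items)
--   return first_max, second_max
-- ===== SOURCE B (Python) =====
-- def first_and_second_max(items):
--   first = -99999999999999999
--   second = -99999999999999999
--   for v in set(items):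
--     if v > first:
--       second = first
--       first = v
--     elif v > second:
--       second = v
--   return first, second
-- ===== Notes on version B (the rewrite author's own statement) =====
-- stated objective: simpler
-- what changed: Replaces A's two separate max-scans plus a set-difference rebuild with a single pass over the deduplicated values maintaining (first, second) together, keeping the same sentinel.
import Mathlib
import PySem

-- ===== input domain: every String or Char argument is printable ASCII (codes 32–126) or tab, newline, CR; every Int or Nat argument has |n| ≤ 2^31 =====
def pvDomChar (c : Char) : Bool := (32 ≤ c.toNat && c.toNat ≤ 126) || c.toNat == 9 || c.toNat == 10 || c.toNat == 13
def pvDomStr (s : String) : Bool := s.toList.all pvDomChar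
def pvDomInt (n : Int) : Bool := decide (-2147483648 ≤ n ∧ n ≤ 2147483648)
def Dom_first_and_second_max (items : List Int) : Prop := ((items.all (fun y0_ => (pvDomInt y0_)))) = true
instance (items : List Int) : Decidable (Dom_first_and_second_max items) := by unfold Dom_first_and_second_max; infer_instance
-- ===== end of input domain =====

-- B replaces A's two max-scans plus set-difference rebuild with one pass over the
-- deduplicated values maintaining (first, second); same sentinel, same results.


-- ===== PORT A =====
-- get_a_max folds max over the CURRENT value of the closed-over `items`
-- (its parameter is ignored by the Python), starting from the sentinel.
def first_and_second_max (items : List Int) : Int × Int :=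
  let items1 := PySem.Set.ofList items
  let first_max := items1.foldl (fun maximum v => max v maximum) (-99999999999999999)
  let items2 := PySem.Set.diff items1 (PySem.Set.ofList [first_max])
  let second_max := items2.foldl (fun maximum v => max v maximum) (-99999999999999999)
  (first_max, second_max)

-- ===== PORT B =====
def first_and_second_max_alt (items : List Int) : Int × Int :=
  (PySem.Set.ofList items).foldl
    (fun (p : Int × Int) v =>
      if v > p.1 then (v, p.1) else if v > p.2 then (p.1, v) else p)
    (-99999999999999999, -99999999999999999)

-- ===== PRECONDITION & SPEC =====
def Spec_first_and_second_max (items : List Int) (out : Int × Int) : Prop := out = first_and_second_max_alt items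
instance (items : List Int) (out : Int × Int) : Decidable (Spec_first_and_second_max items out) := by unfold Spec_first_and_second_max; infer_instance

-- ===== CLAIM (what is proved, stated in full; the proofs are below) =====
def Claim_equal_first_and_second_max : Prop := ∀ (items : List Int), Dom_first_and_second_max items → Spec_first_and_second_max items (first_and_second_max items)

-- ===== LEMMAS AND PROOFS =====

def pvFMax (l : List Int) : Int := l.foldl (fun maximum v => max v maximum) (-99999999999999999)

def pvStep (p : Int × Int) (v : Int) : Int × Int :=
  if v > p.1 then (v, p.1) else if v > p.2 then (p.1, v) else p

theorem pvfmax_append (l : List Int) (x : Int) :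
    pvFMax (l ++ [x]) = max x (pvFMax l) := by
  simp [pvFMax, List.foldl_append]

theorem pvfmax_mem (l : List Int) : pvFMax l ∈ l ∨ pvFMax l = -99999999999999999 := by
  induction l using List.reverseRecOn with
  | nil => right; simp [pvFMax]
  | append_singleton l x ih =>
    rw [pvfmax_append]
    by_cases h : x ≤ pvFMax l
    · rw [max_eq_right h]
      rcases ih with h' | h'
      · left; exact List.mem_append_left _ h'
      · right; exact h'
    · rw [max_eq_left (by omega)]; left; simp

-- main invariant: on a nodup list of values above the sentinel, the one-pass fold
-- computes (max, max of the list with the max filtered out)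
theorem pv_key (l : List Int) (hn : l.Nodup) (hb : ∀ x ∈ l, (-99999999999999999 : Int) < x) :
    l.foldl pvStep (-99999999999999999, -99999999999999999) =
      (pvFMax l, pvFMax (l.filter (fun x => x ≠ pvFMax l))) := by
  induction l using List.reverseRecOn with
  | nil => simp [pvFMax]
  | append_singleton l x ih =>
    have hnl : l.Nodup := (List.nodup_append.mp hn).1
    have hx : x ∉ l := by
      have := List.nodup_append.mp hn
      simp at this
      tauto
    have hbl : ∀ y ∈ l, (-99999999999999999 : Int) < y := fun y hy => hb y (List.mem_append_left _ hy)
    have hbx : (-99999999999999999 : Int) < x := hb x (by simp)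
    rw [List.foldl_append, ih hnl hbl, pvfmax_append]
    simp only [List.foldl_cons, List.foldl_nil]
    by_cases h : pvFMax l < x
    · -- x is the new max
      rw [max_eq_left h.le]
      have hfilt : (l ++ [x]).filter (fun y => y ≠ x) = l := by
        have h1 : l.filter (fun y => y ≠ x) = l :=
          List.filter_eq_self.mpr (fun y hy => by
            simp only [ne_eq, decide_eq_true_eq]; rintro rfl; exact hx hy)
        rw [List.filter_append, h1]
        simp
      rw [hfilt]
      unfold pvStep
      rw [if_pos (by omega)]
    · -- old max stays
      push Not at h
      have hne : x ≠ pvFMax l := by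
        rintro rfl
        rcases pvfmax_mem l with hm | hm
        · exact hx hm
        · exact absurd hm (by omega)
      have hlt : x < pvFMax l := lt_of_le_of_ne h hne
      rw [max_eq_right h]
      have hfilt : (l ++ [x]).filter (fun y => y ≠ pvFMax l)
          = l.filter (fun y => y ≠ pvFMax l) ++ [x] := by
        rw [List.filter_append]
        simp [hne]
      rw [hfilt, pvfmax_append]
      unfold pvStep
      rw [if_neg (by omega)]
      by_cases h2 : pvFMax (l.filter (fun y => y ≠ pvFMax l)) < x
      · rw [if_pos (by omega), max_eq_left h2.le]
      · push Not at h2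
        rw [if_neg (by omega), max_eq_right h2]

theorem pv_diff_eq_filter (s : List Int) (m : Int) :
    PySem.Set.diff s (PySem.Set.ofList [m]) = s.filter (fun x => x ≠ m) := by
  have : PySem.Set.ofList [m] = [m] := rfl
  rw [this]
  simp [PySem.Set.diff, PySem.Set.contains]

-- ===== VERDICT (by name: the statement is the Claim_ definition above) =====
theorem first_and_second_max_spec : Claim_equal_first_and_second_max := by
  intro items hdom
  unfold Spec_first_and_second_max first_and_second_max first_and_second_max_alt
  have hb : ∀ x ∈ PySem.Set.ofList items, (-99999999999999999 : Int) < x := by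
    intro x hx
    have hx' : x ∈ items := (PySem.Set.mem_ofList _ _).mp hx
    have := List.all_eq_true.mp hdom x hx'
    simp only [pvDomInt, decide_eq_true_eq] at this
    omega
  have key := pv_key (PySem.Set.ofList items) (PySem.Set.nodup_ofList items) hb
  show (pvFMax (PySem.Set.ofList items),
        pvFMax (PySem.Set.diff (PySem.Set.ofList items)
                 (PySem.Set.ofList [pvFMax (PySem.Set.ofList items)]))) =
      (PySem.Set.ofList items).foldl pvStep (-99999999999999999, -99999999999999999)
  rw [key, pv_diff_eq_filter]
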